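-- pv_equiv track=rewrite | github.com/kulikovanna/python_lab1 | task11-14.py | median_length
-- ===== SOURCE A (Python) =====
-- def median_length(strings):
--     lengths = [len(s) for s in strings]
--     sorted_lengths = sorted(lengths)
--     n = len(sorted_lengths)
--     mid = n // 2 #индекс ср элемента
--     if n % 2 == 0:
--         return sorted_lengths[mid] # если количество элементов четное, то медиана - среднее значение двух средних элементов
--     else:
--         return sorted_lengths[mid] # если количество элементов нечетное, то медиана - средний элемент
-- ===== SOURCE B (Python) =====
-- def median_length(strings):
--     xs = [len(s) for s in strings]
--     k = len(xs) // 2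
--     # iterative three-way-partition quickselect (middle pivot) for the k-th smallest
--     while True:
--         p = xs[len(xs) // 2]
--         lo = [x for x in xs if x < p]
--         if k < len(lo):
--             xs = lo
--             continue
--         hi = [x for x in xs if x > p]
--         if k < len(xs) - len(hi):
--             return p
--         k -= len(xs) - len(hi)
--         xs = hi
-- ===== Notes on version B (the rewrite author's own statement) =====
-- stated objective: alternative
-- what changed: Replaced sort-then-index with an iterative three-way-partition quickselect that finds the n//2-th smallest length without sorting.
import Mathlib
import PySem

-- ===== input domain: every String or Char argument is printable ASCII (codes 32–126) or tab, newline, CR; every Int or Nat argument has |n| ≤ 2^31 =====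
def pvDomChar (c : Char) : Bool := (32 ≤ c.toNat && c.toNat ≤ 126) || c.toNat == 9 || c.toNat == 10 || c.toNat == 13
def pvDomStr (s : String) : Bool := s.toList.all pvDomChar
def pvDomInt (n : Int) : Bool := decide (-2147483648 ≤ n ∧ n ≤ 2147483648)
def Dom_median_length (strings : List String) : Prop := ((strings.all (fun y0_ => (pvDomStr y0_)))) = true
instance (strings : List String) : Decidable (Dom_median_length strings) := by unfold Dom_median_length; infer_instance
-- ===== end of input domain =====

-- B replaces sort-then-index by an iterative three-way-partition quickselect for the
-- n//2-th smallest length (alternative algorithm; equal return value proved below).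

-- ===== PORT A =====
def median_length (strings : List String) : Int :=
  let lengths := strings.map (fun s => PySem.Str.len s)
  let sorted_lengths := PySem.List.sorted lengths (fun x => x)
  let n : Int := sorted_lengths.length
  let mid := PySem.Int.floordiv n 2
  if PySem.Int.mod n 2 = 0 then
    PySem.List.pyGetD sorted_lengths mid 0
  else
    PySem.List.pyGetD sorted_lengths mid 0

-- ===== PORT B =====
-- termination helpers for the quickselect loop (cited by name in decreasing_by)
theorem pvPivot_mem (xs : List Int) (hx : ¬ xs.length = 0) :
    PySem.List.pyGetD xs (PySem.Int.floordiv (xs.length : Int) 2) 0 ∈ xs := by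
  apply PySem.List.pyGetD_mem
  rw [PySem.Int.floordiv_eq_ediv_of_pos (by norm_num)]
  unfold PySem.Raise.InRange
  omega

-- the Python 'while True' loop, one iteration = one recursive call
def pvSelectLoop (xs : List Int) (k : Int) : Int :=
  if hx : xs.length = 0 then 0   -- unreachable under Pre_: Python raises IndexError here
  else
    let p := PySem.List.pyGetD xs (PySem.Int.floordiv (xs.length : Int) 2) 0
    let lo := xs.filter (fun x => decide (x < p))
    if k < (lo.length : Int) then pvSelectLoop lo k
    else
      let hi := xs.filter (fun x => decide (p < x))
      if k < (xs.length : Int) - (hi.length : Int) then p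
      else pvSelectLoop hi (k - ((xs.length : Int) - (hi.length : Int)))
termination_by xs.length
decreasing_by
  · simp only [List.length_unattach]
    exact lt_of_lt_of_le
      (List.length_filter_lt_length_iff_exists.mpr
        ⟨⟨_, pvPivot_mem xs hx⟩, List.mem_attach _ _, by simp⟩)
      (le_of_eq (List.length_attach (l := xs)))
  · simp only [List.length_unattach]
    exact lt_of_lt_of_le
      (List.length_filter_lt_length_iff_exists.mpr
        ⟨⟨_, pvPivot_mem xs hx⟩, List.mem_attach _ _, by simp⟩)
      (le_of_eq (List.length_attach (l := xs)))

def median_length_alt (strings : List String) : Int :=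
  let lengths := strings.map (fun s => PySem.Str.len s)
  pvSelectLoop lengths (PySem.Int.floordiv (lengths.length : Int) 2)

-- ===== PRECONDITION & SPEC =====
-- Pre_ excludes only the empty list, on which A raises IndexError.
def Pre_median_length (strings : List String) : Prop := strings ≠ []
instance (strings : List String) : Decidable (Pre_median_length strings) := by
  unfold Pre_median_length; infer_instance
def pvWitness_median_length : List String := ["a", "bc", ""]

def Spec_median_length (strings : List String) (out : Int) : Prop := out = median_length_alt strings
instance (strings : List String) (out : Int) : Decidable (Spec_median_length strings out) := by
  unfold Spec_median_length; infer_instance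

-- ===== CLAIM (what is proved, stated in full; the proofs are below) =====
def Claim_equal_median_length : Prop := ∀ (strings : List String), Dom_median_length strings → Pre_median_length strings → Spec_median_length strings (median_length strings)

-- ===== LEMMAS AND PROOFS =====

theorem pvFilter_lt (xs : List Int) (p : Int) (hp : p ∈ xs) (f : Int → Bool)
    (hf : f p = false) : (xs.filter f).length < xs.length :=
  List.length_filter_lt_length_iff_exists.mpr ⟨p, hp, by simp [hf]⟩

-- three-way partition by a pivot is a permutation of the list
theorem pvFilter3_perm (xs : List Int) (p : Int) :
    (xs.filter (fun x => decide (x < p)) ++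
      (xs.filter (fun x => decide (x = p)) ++ xs.filter (fun x => decide (p < x)))).Perm xs := by
  induction xs with
  | nil => simp
  | cons a t ih =>
    rcases lt_trichotomy a p with h | h | h
    · rw [List.filter_cons, List.filter_cons, List.filter_cons,
        if_pos (by simp [h]), if_neg (by simp; omega), if_neg (by simp; omega)]
      exact ih.cons a
    · subst h
      have hgoal : (t.filter (fun x => decide (x < a)) ++
          (a :: t.filter (fun x => decide (x = a)) ++ t.filter (fun x => decide (a < x)))).Perm
          (a :: t) := by
        have h1 : (t.filter (fun x => decide (x < a)) ++
            (a :: t.filter (fun x => decide (x = a)) ++ t.filter (fun x => decide (a < x))))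
            = (t.filter (fun x => decide (x < a)) ++
              a :: (t.filter (fun x => decide (x = a)) ++ t.filter (fun x => decide (a < x)))) := by
          simp
        rw [h1]
        exact List.perm_middle.trans (ih.cons a)
      rw [List.filter_cons, List.filter_cons, List.filter_cons,
        if_neg (by simp), if_pos (by simp), if_neg (by simp)]
      exact hgoal
    · have hgoal : (t.filter (fun x => decide (x < p)) ++
          (t.filter (fun x => decide (x = p)) ++ a :: t.filter (fun x => decide (p < x)))).Perm
          (a :: t) := by
        have h1 : (t.filter (fun x => decide (x < p)) ++
            (t.filter (fun x => decide (x = p)) ++ a :: t.filter (fun x => decide (p < x))))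
            = ((t.filter (fun x => decide (x < p)) ++ t.filter (fun x => decide (x = p))) ++
              a :: t.filter (fun x => decide (p < x))) := by
          simp
        rw [h1]
        refine List.perm_middle.trans ?_
        have h2 : ((t.filter (fun x => decide (x < p)) ++ t.filter (fun x => decide (x = p))) ++
            t.filter (fun x => decide (p < x)))
            = (t.filter (fun x => decide (x < p)) ++
              (t.filter (fun x => decide (x = p)) ++ t.filter (fun x => decide (p < x)))) := by
          simp
        rw [h2]
        exact ih.cons a
      rw [List.filter_cons, List.filter_cons, List.filter_cons,
        if_neg (by simp; omega), if_neg (by simp; omega), if_pos (by simp [h])]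
      exact hgoal

-- sorted(xs) splits as sorted(below pivot) ++ (equal pivot) ++ sorted(above pivot)
theorem pvSorted_partition (xs : List Int) (p : Int) :
    PySem.List.sorted xs (fun x => x) =
      PySem.List.sorted (xs.filter (fun x => decide (x < p))) (fun x => x) ++
        (xs.filter (fun x => decide (x = p)) ++
          PySem.List.sorted (xs.filter (fun x => decide (p < x))) (fun x => x)) := by
  apply PySem.List.sorted_id_eq_of_perm_of_pairwise
  · exact ((PySem.List.sorted_perm _ _ _).append
      ((List.Perm.refl _).append (PySem.List.sorted_perm _ _ _))).trans (pvFilter3_perm xs p)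
  · rw [List.pairwise_append]
    refine ⟨PySem.List.sorted_pairwise _ _, ?_, ?_⟩
    · rw [List.pairwise_append]
      refine ⟨?_, PySem.List.sorted_pairwise _ _, ?_⟩
      · apply List.pairwise_of_forall_mem_list
        intro a ha b hb
        simp only [List.mem_filter, decide_eq_true_eq] at ha hb
        omega
      · intro a ha b hb
        rw [PySem.List.mem_sorted] at hb
        simp only [List.mem_filter, decide_eq_true_eq] at ha hb
        omega
    · intro a ha b hb
      rw [PySem.List.mem_sorted] at ha
      simp only [List.mem_append, PySem.List.mem_sorted] at hb
      simp only [List.mem_filter, decide_eq_true_eq] at ha hb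
      rcases hb with hb | hb <;> omega

-- quickselect returns the k-th element of the sorted list (fueled strong induction)
theorem pvSelect_correct (n : Nat) : ∀ (xs : List Int) (k : Int), xs.length ≤ n →
    0 ≤ k → k < (xs.length : Int) →
    pvSelectLoop xs k = PySem.List.pyGetD (PySem.List.sorted xs (fun x => x)) k 0 := by
  induction n with
  | zero => intro xs k h1 h2 h3; omega
  | succ m ih =>
    intro xs k hn hk0 hk
    have hx : ¬ xs.length = 0 := by omega
    rw [pvSelectLoop, dif_neg hx]
    dsimp only
    have hpm : PySem.List.pyGetD xs (PySem.Int.floordiv ((xs.length : Int)) 2) 0 ∈ xs :=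
      pvPivot_mem xs hx
    rw [pvSorted_partition xs (PySem.List.pyGetD xs (PySem.Int.floordiv ((xs.length : Int)) 2) 0)]
    generalize hp : PySem.List.pyGetD xs (PySem.Int.floordiv ((xs.length : Int)) 2) 0 = p at hpm ⊢
    set lo := xs.filter (fun x => decide (x < p)) with hlo
    set eqs := xs.filter (fun x => decide (x = p)) with heqs
    set hi := xs.filter (fun x => decide (p < x)) with hhi
    have hlen : lo.length + (eqs.length + hi.length) = xs.length := by
      simpa using (pvFilter3_perm xs p).length_eq
    have hLlo : (PySem.List.sorted lo (fun x => x)).length = lo.length :=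
      PySem.List.length_sorted _ _ _
    have hLhi : (PySem.List.sorted hi (fun x => x)).length = hi.length :=
      PySem.List.length_sorted _ _ _
    have hlo_lt : lo.length < xs.length :=
      pvFilter_lt xs p hpm _ (decide_eq_false (lt_irrefl p))
    have hhi_lt : hi.length < xs.length :=
      pvFilter_lt xs p hpm _ (decide_eq_false (lt_irrefl p))
    rw [PySem.List.pyGetD_eq_getElem _ _ hk0
      (by simp only [List.length_append, hLlo, hLhi]; omega)]
    split_ifs with h1 h2
    · -- k < |lo| : recurse into the lower part
      rw [List.getElem_append_left (by omega)]
      rw [ih lo k (by omega) hk0 h1]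
      rw [PySem.List.pyGetD_eq_getElem _ _ hk0 (by omega)]
    · -- the index lands in the equal block: the answer is the pivot
      rw [List.getElem_append_right (by omega)]
      rw [List.getElem_append_left (by omega)]
      have hmem : eqs[k.toNat - (PySem.List.sorted lo (fun x => x)).length]'(by omega) ∈ eqs :=
        List.getElem_mem _
      have hv : ∀ x ∈ eqs, x = p := by
        intro x hxmem
        rw [heqs, List.mem_filter] at hxmem
        exact of_decide_eq_true hxmem.2
      exact (hv _ hmem).symm
    · -- recurse into the upper part
      rw [List.getElem_append_right (by omega)]
      rw [List.getElem_append_right (by omega)]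
      rw [ih hi (k - ((xs.length : Int) - (hi.length : Int))) (by omega) (by omega) (by omega)]
      rw [PySem.List.pyGetD_eq_getElem _ _ (by omega) (by omega)]
      congr 1
      omega

-- ===== VERDICT (by name: the statement is the Claim_ definition above) =====
theorem median_length_spec : Claim_equal_median_length := by
  intro strings _ hpre
  unfold Spec_median_length median_length median_length_alt
  simp only [PySem.List.length_sorted, ite_self]
  set lengths := strings.map (fun s => PySem.Str.len s) with hl
  have hne : lengths.length ≠ 0 := by
    simp [hl]
    intro h
    exact hpre h
  have hmid : PySem.Int.floordiv (lengths.length : Int) 2 = (lengths.length : Int) / 2 :=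
    PySem.Int.floordiv_eq_ediv_of_pos (by norm_num)
  rw [pvSelect_correct lengths.length lengths _ le_rfl (by rw [hmid]; omega)
    (by rw [hmid]; omega)]
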